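-- pv_equiv track=rewrite | github.com/fotoblinkskudd2-create/Tet | app.py | _normalize_medium_label
-- ===== SOURCE A (Python) =====
-- from typing import Callable, Dict, Iterable, List, Optional, Tuple
--
-- _MEDIUM_SYNONYMS: Dict[str, Tuple[str, ...]] = {
--     "photo": ("picture", "image", "shot"),
--     "video": ("film", "clip", "reel"),
--     "music": ("song", "track", "audio"),
--     "art": ("illustration", "drawing", "painting", "concept art"),
--     "poem": ("poetry", "verse", "haiku", "sonnet"),
-- }
--
-- def _normalize_medium_label(label: Optional[str]) -> Optional[str]:
--     if not label:
--         return None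
--     lowered = label.lower().strip()
--     for medium, aliases in _MEDIUM_SYNONYMS.items():
--         if lowered == medium or lowered in aliases:
--             return medium
--     return None
-- ===== SOURCE B (Python) =====
-- from typing import List, Optional, Tuple
--
-- # Flat lookup table of (label, canonical medium) pairs, with labels pre-sorted
-- # ascending so the function can locate a key by binary search.
-- _TABLE: List[Tuple[str, str]] = [
--     ("art", "art"),
--     ("audio", "music"),
--     ("clip", "video"),
--     ("concept art", "art"),
--     ("drawing", "art"),
--     ("film", "video"),
--     ("haiku", "poem"),
--     ("illustration", "art"),
--     ("image", "photo"),
--     ("music", "music"),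
--     ("painting", "art"),
--     ("photo", "photo"),
--     ("picture", "photo"),
--     ("poem", "poem"),
--     ("poetry", "poem"),
--     ("reel", "video"),
--     ("shot", "photo"),
--     ("song", "music"),
--     ("sonnet", "poem"),
--     ("track", "music"),
--     ("verse", "poem"),
--     ("video", "video"),
-- ]
--
-- def _normalize_medium_label(label: Optional[str]) -> Optional[str]:
--     if not label:
--         return None
--     key = label.lower().strip()
--     lo, hi = 0, len(_TABLE)
--     while lo < hi:
--         mid = (lo + hi) // 2
--         if _TABLE[mid][0] < key:
--             lo = mid + 1
--         else:
--             hi = mid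
--     if lo < len(_TABLE) and _TABLE[lo][0] == key:
--         return _TABLE[lo][1]
--     return None
-- ===== Notes on version B (the rewrite author's own statement) =====
-- stated objective: alternative
-- what changed: Replaced A's linear scan over the nested medium->aliases table (equality plus alias-tuple membership per entry) by binary search over a flat (label, medium) table pre-sorted by label, locating the key in O(log n) comparisons.
import Mathlib
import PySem

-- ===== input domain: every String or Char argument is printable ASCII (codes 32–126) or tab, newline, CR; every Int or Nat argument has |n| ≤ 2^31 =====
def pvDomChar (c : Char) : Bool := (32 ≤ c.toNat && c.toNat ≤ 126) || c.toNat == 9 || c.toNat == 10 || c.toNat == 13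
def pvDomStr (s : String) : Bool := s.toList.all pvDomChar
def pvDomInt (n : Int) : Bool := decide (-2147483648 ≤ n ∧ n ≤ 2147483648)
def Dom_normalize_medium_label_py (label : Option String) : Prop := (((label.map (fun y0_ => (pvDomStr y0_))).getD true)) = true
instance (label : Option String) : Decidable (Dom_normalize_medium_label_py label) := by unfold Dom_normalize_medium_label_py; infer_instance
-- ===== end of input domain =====

-- B replaces A's per-call linear scan of the nested synonym table by binary search
-- over a flat pre-sorted (label, medium) table; objective: alternative algorithm.

-- ===== PORT A =====
-- the module-level synonym table (variable-length str tuples ported as List String)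
def pvSynA : List (String × List String) :=
  [("photo", ["picture", "image", "shot"]),
   ("video", ["film", "clip", "reel"]),
   ("music", ["song", "track", "audio"]),
   ("art", ["illustration", "drawing", "painting", "concept art"]),
   ("poem", ["poetry", "verse", "haiku", "sonnet"])]

-- the 'for medium, aliases in _MEDIUM_SYNONYMS.items(): if …: return medium' loop
def pvLoopA (lowered : String) : List (String × List String) → Option String
  | [] => none
  | (medium, aliases) :: rest =>
      if lowered == medium || aliases.contains lowered then some medium
      else pvLoopA lowered rest

def normalize_medium_label_py (label : Option String) : Option String :=
  match label with
  | none => none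
  | some s =>
      if s == "" then none        -- 'if not label: return None' (falsy = None or "")
      else
        let lowered := PySem.Str.strip (PySem.Str.lower s)
        pvLoopA lowered pvSynA

-- ===== PORT B =====
-- Source B's module-level _TABLE literal: (label, medium) pairs, labels sorted ascending
def pvTable : List (String × String) :=
  [("art", "art"), ("audio", "music"), ("clip", "video"), ("concept art", "art"),
   ("drawing", "art"), ("film", "video"), ("haiku", "poem"), ("illustration", "art"),
   ("image", "photo"), ("music", "music"), ("painting", "art"), ("photo", "photo"),
   ("picture", "photo"), ("poem", "poem"), ("poetry", "poem"), ("reel", "video"),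
   ("shot", "photo"), ("song", "music"), ("sonnet", "poem"), ("track", "music"),
   ("verse", "poem"), ("video", "video")]

def pvKeyB (i : Nat) : String := (pvTable.getD i ("", "")).1

-- Source B's 'while lo < hi' binary-search loop; fuel bounds the iteration count
-- (the loop runs at most hi-lo ≤ 22 times), the loop state (lo, hi) is the same.
def pvSearchB (key : String) : Nat → Nat → Nat → Nat
  | 0, lo, _ => lo
  | fuel + 1, lo, hi =>
      if lo < hi then
        let mid := (lo + hi) / 2
        -- '_TABLE[mid][0] < key': Python str '<' = code-point lexicographic,
        -- exact as PySem.Chars.strLt on the char lists (PYSEM 'str COMPARISON')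
        if PySem.Chars.strLt (pvKeyB mid).toList key.toList then pvSearchB key fuel (mid + 1) hi
        else pvSearchB key fuel lo mid
      else lo

def normalize_medium_label_py_alt (label : Option String) : Option String :=
  match label with
  | none => none
  | some s =>
      if s == "" then none
      else
        let key := PySem.Str.strip (PySem.Str.lower s)
        let lo := pvSearchB key 22 0 22
        if lo < 22 && pvKeyB lo == key then some (pvTable.getD lo ("", "")).2
        else none

-- ===== PRECONDITION & SPEC =====
def Spec_normalize_medium_label_py (label : Option String) (out : Option String) : Prop := out = normalize_medium_label_py_alt label
instance (label : Option String) (out : Option String) : Decidable (Spec_normalize_medium_label_py label out) := by unfold Spec_normalize_medium_label_py; infer_instance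

-- ===== CLAIM (what is proved, stated in full; the proofs are below) =====
def Claim_equal_normalize_medium_label_py : Prop := ∀ (label : Option String), Dom_normalize_medium_label_py label → Spec_normalize_medium_label_py label (normalize_medium_label_py label)

-- ===== LEMMAS AND PROOFS =====

-- core fact: A's scan and B's binary search agree on every key string
set_option maxHeartbeats 4000000 in
theorem pvScan_eq_bisect (t : String) :
    pvLoopA t pvSynA =
      (if pvSearchB t 22 0 22 < 22 && pvKeyB (pvSearchB t 22 0 22) == t
       then some (pvTable.getD (pvSearchB t 22 0 22) ("", "")).2 else none) := by
  by_cases hmem : t ∈ ["art", "audio", "clip", "concept art", "drawing", "film", "haiku",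
      "illustration", "image", "music", "painting", "photo", "picture", "poem", "poetry",
      "reel", "shot", "song", "sonnet", "track", "verse", "video"]
  · fin_cases hmem <;> decide
  · simp only [List.mem_cons, List.not_mem_nil, or_false, not_or] at hmem
    obtain ⟨h1, h2, h3, h4, h5, h6, h7, h8, h9, h10, h11, h12, h13, h14, h15, h16, h17,
      h18, h19, h20, h21, h22⟩ := hmem
    have hscan : pvLoopA t pvSynA = none := by
      simp [pvLoopA, pvSynA, h1, h2, h3, h4, h5, h6, h7, h8, h9, h10, h11, h12, h13, h14,
        h15, h16, h17, h18, h19, h20, h21, h22]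
    rw [hscan]
    generalize pvSearchB t 22 0 22 = lo
    split
    · rename_i hcond
      simp only [Bool.and_eq_true, decide_eq_true_eq, beq_iff_eq] at hcond
      obtain ⟨hlt, heq⟩ := hcond
      exfalso
      interval_cases lo <;> simp [pvKeyB, pvTable] at heq <;> exact absurd heq.symm (by assumption)
    · rfl

-- ===== VERDICT (by name: the statement is the Claim_ definition above) =====
theorem normalize_medium_label_py_spec : Claim_equal_normalize_medium_label_py := by
  intro label _
  unfold Spec_normalize_medium_label_py normalize_medium_label_py normalize_medium_label_py_alt
  cases label with
  | none => rfl
  | some s =>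
      by_cases h : s == ""
      · simp [h]
      · simp only [h, Bool.false_eq_true, if_false, pvScan_eq_bisect]
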